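-- pv_equiv track=rewrite | github.com/yassineayadi/ctci-python | src/chapter08/p04.py | get_all_subsets_of_set_suffix_solution
-- ===== SOURCE A (Python) =====
-- def get_all_subsets_of_set_suffix_solution(universe: list) -> list[list]:
--     size = len(universe)
--     memo: list[list] = [None] * size  # noqa
--     # base case
--     for i in range(size):
--         memo[i] = [[universe[i]]]
--
--     for i in reversed(range(size - 1)):
--         for j in memo[i + 1]:
--             memo[i].append([universe[i]] + j)
--         memo[i].extend(memo[i + 1])
--
--     return memo
-- ===== SOURCE B (Python) =====
-- def get_all_subsets_of_set_suffix_solution(universe: list) -> list[list]: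
--     def subsets(suffix):
--         head, rest = suffix[0], suffix[1:]
--         if not rest:
--             return [[head]]
--         r = subsets(rest)
--         return [[head]] + [[head] + j for j in r] + r
--
--     return [subsets(universe[i:]) for i in range(len(universe))]
-- ===== Notes on version B (the rewrite author's own statement) =====
-- stated objective: alternative
-- what changed: Replaces the bottom-up memo-table (in-place list updates sharing tails across entries) with a top-down recursion on each suffix that rebuilds its subset list independently.
import Mathlib
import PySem

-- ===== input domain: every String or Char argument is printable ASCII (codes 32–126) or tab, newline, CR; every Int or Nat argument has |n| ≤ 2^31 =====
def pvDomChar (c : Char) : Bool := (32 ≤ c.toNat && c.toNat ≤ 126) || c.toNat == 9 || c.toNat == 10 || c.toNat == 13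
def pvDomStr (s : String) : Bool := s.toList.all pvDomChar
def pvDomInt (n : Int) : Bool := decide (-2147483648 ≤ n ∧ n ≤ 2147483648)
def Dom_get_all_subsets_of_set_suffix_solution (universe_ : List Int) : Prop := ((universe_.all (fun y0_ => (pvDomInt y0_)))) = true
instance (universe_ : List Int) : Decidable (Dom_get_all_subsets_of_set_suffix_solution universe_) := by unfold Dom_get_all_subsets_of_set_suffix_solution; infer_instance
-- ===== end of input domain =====

-- B rebuilds each suffix's subset list by independent top-down recursion instead of A's bottom-up memo table.


-- ===== PORT A =====
-- memo indices are always in range, so universe[i] / memo[i] are ported with getD (never hit the default).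
def get_all_subsets_of_set_suffix_solution (universe_ : List Int) : List (List (List Int)) :=
  let size := universe_.length
  -- memo = [None] * size  (placeholder [])
  let memo0 : List (List (List Int)) := List.replicate size []
  -- for i in range(size): memo[i] = [[universe[i]]]
  let memo1 := (List.range size).foldl (fun m i => m.set i [[universe_.getD i 0]]) memo0
  -- for i in reversed(range(size - 1)): append [universe[i]]+j for j in memo[i+1]; extend memo[i+1]
  (List.range (size - 1)).reverse.foldl
    (fun m i =>
      let mi1 := m.getD (i + 1) []
      m.set i ((m.getD i []) ++ mi1.map (fun j => universe_.getD i 0 :: j) ++ mi1)) memo1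

-- ===== PORT B =====
-- subsets(suffix): head = suffix[0]; rest = suffix[1:]; base case when rest is empty.
def pvSubsetsSuffix : List Int → List (List Int)
  | [] => []          -- unreachable: every slice universe[i:] passed in is nonempty
  | [x] => [[x]]
  | x :: y :: t =>
      let r := pvSubsetsSuffix (y :: t)
      [[x]] ++ r.map (fun j => x :: j) ++ r

def get_all_subsets_of_set_suffix_solution_alt (universe_ : List Int) : List (List (List Int)) :=
  (List.range universe_.length).map
    (fun (i : Nat) => pvSubsetsSuffix (PySem.List.slice universe_ (some ((i : Int))) none))

-- ===== PRECONDITION & SPEC =====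
def Spec_get_all_subsets_of_set_suffix_solution (universe_ : List Int) (out : List (List (List Int))) : Prop := out = get_all_subsets_of_set_suffix_solution_alt universe_
instance (universe_ : List Int) (out : List (List (List Int))) : Decidable (Spec_get_all_subsets_of_set_suffix_solution universe_ out) := by unfold Spec_get_all_subsets_of_set_suffix_solution; infer_instance

-- ===== CLAIM (what is proved, stated in full; the proofs are below) =====
def Claim_equal_get_all_subsets_of_set_suffix_solution : Prop := ∀ (universe_ : List Int), Dom_get_all_subsets_of_set_suffix_solution universe_ → Spec_get_all_subsets_of_set_suffix_solution universe_ (get_all_subsets_of_set_suffix_solution universe_)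

-- ===== LEMMAS AND PROOFS =====

lemma pv_map_range_set {α : Type} (n i : Nat) (f : Nat → α) (v : α) (_hi : i < n) :
    ((List.range n).map f).set i v
      = (List.range n).map (fun j => if j = i then v else f j) := by
  apply List.ext_getElem
  · simp
  · intro k h1 h2
    simp only [List.getElem_set, List.getElem_map, List.getElem_range]
    split_ifs with h h' h'
    · rfl
    · omega
    · omega
    · rfl

lemma pv_getD_map_range {α : Type} (n i : Nat) (f : Nat → α) (d : α) (hi : i < n) :
    ((List.range n).map f).getD i d = f i := by
  simp [List.getD_eq_getElem?_getD, hi]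

-- the base-case loop fills the table with singletons
lemma pv_init_fold (u : List Int) (n : Nat) (g : Nat → List (List Int)) :
    ∀ (k : Nat), k ≤ n →
    (List.range k).foldl (fun m i => m.set i [[u.getD i 0]]) ((List.range n).map g)
      = (List.range n).map (fun j => if j < k then [[u.getD j 0]] else g j) := by
  intro k
  induction k with
  | zero =>
      intro _
      simp only [List.range_zero, List.foldl_nil]
      apply List.map_congr_left
      intro j _
      simp
  | succ k ih =>
      intro hk
      rw [List.range_succ, List.foldl_append, ih (by omega)]
      simp only [List.foldl_cons, List.foldl_nil]
      rw [pv_map_range_set n k _ _ (by omega)]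
      apply List.map_congr_left
      intro j hj
      have hjn : j < n := List.mem_range.mp hj
      by_cases h : j = k
      · subst h; simp
      · by_cases h2 : j < k
        · simp [h, h2, Nat.lt_succ_of_lt h2]
        · have : ¬ j < k + 1 := by omega
          simp [h, h2, this]

lemma pv_subsetsSuffix_cons (x : Int) (rest : List Int) (h : rest ≠ []) :
    pvSubsetsSuffix (x :: rest)
      = [[x]] ++ (pvSubsetsSuffix rest).map (fun j => x :: j) ++ pvSubsetsSuffix rest := by
  cases rest with
  | nil => exact absurd rfl h
  | cons y t => rfl

lemma pv_drop_cons (u : List Int) (k : Nat) (hk : k < u.length) :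
    u.drop k = u.getD k 0 :: u.drop (k + 1) := by
  rw [List.getD_eq_getElem u 0 hk]
  exact List.drop_eq_getElem_cons hk

-- the reversed loop turns entries below k from singletons into the full suffix subset lists
lemma pv_main_fold (u : List Int) :
    ∀ (k : Nat), k ≤ u.length - 1 →
    (List.range k).reverse.foldl
        (fun m i =>
          let mi1 := m.getD (i + 1) []
          m.set i ((m.getD i []) ++ mi1.map (fun j => u.getD i 0 :: j) ++ mi1))
        ((List.range u.length).map
          (fun j => if j < k then [[u.getD j 0]] else pvSubsetsSuffix (u.drop j)))
      = (List.range u.length).map (fun j => pvSubsetsSuffix (u.drop j)) := by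
  intro k
  induction k with
  | zero =>
      intro _
      simp
  | succ k ih =>
      intro hk
      have hn : 0 < u.length := by omega
      have hk1 : k + 1 < u.length := by omega
      rw [List.range_succ, List.reverse_append, List.reverse_singleton]
      simp only [List.singleton_append, List.foldl_cons]
      have step :
          (let mi1 := ((List.range u.length).map
              (fun j => if j < k + 1 then [[u.getD j 0]] else pvSubsetsSuffix (u.drop j))).getD (k + 1) []
           ((List.range u.length).map
              (fun j => if j < k + 1 then [[u.getD j 0]] else pvSubsetsSuffix (u.drop j))).set k
             ((((List.range u.length).map
              (fun j => if j < k + 1 then [[u.getD j 0]] else pvSubsetsSuffix (u.drop j))).getD k [])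
               ++ mi1.map (fun j => u.getD k 0 :: j) ++ mi1))
          = (List.range u.length).map
              (fun j => if j < k then [[u.getD j 0]] else pvSubsetsSuffix (u.drop j)) := by
        simp only []
        rw [pv_getD_map_range _ _ _ _ hk1, pv_getD_map_range _ _ _ _ (by omega)]
        have h1 : ¬ (k + 1 < k + 1) := by omega
        have h2 : k < k + 1 := by omega
        simp only [h1, if_false, h2, if_true]
        rw [pv_map_range_set _ _ _ _ (by omega)]
        apply List.map_congr_left
        intro j hj
        by_cases h : j = k
        · rw [if_pos h, h, if_neg (lt_irrefl k)]
          rw [pv_drop_cons u k (by omega)]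
          rw [pv_subsetsSuffix_cons _ _ (by
            intro hnil
            have := congrArg List.length hnil
            simp at this
            omega)]
        · by_cases h2 : j < k
          · simp [h, h2, Nat.lt_succ_of_lt h2]
          · have : ¬ j < k + 1 := by omega
            simp [h, h2, this]
      rw [step, ih (by omega)]

lemma pv_replicate_eq_map (n : Nat) :
    (List.replicate n ([] : List (List Int))) = (List.range n).map (fun _ => []) := by
  apply List.ext_getElem <;> simp

-- ===== VERDICT (by name: the statement is the Claim_ definition above) =====
theorem get_all_subsets_of_set_suffix_solution_spec : Claim_equal_get_all_subsets_of_set_suffix_solution := by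
  intro u _
  show get_all_subsets_of_set_suffix_solution u = get_all_subsets_of_set_suffix_solution_alt u
  unfold get_all_subsets_of_set_suffix_solution get_all_subsets_of_set_suffix_solution_alt
  simp only []
  rw [pv_replicate_eq_map, pv_init_fold u u.length _ u.length (le_refl _)]
  have hinit :
      (List.range u.length).map (fun j => if j < u.length then [[u.getD j 0]] else []) =
      (List.range u.length).map
        (fun j => if j < u.length - 1 then [[u.getD j 0]] else pvSubsetsSuffix (u.drop j)) := by
    apply List.map_congr_left
    intro j hj
    have hjn : j < u.length := List.mem_range.mp hj
    by_cases h : j < u.length - 1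
    · simp [h, hjn]
    · have hje : j = u.length - 1 := by omega
      rw [if_pos hjn, if_neg h]
      rw [pv_drop_cons u j hjn]
      have hd : u.drop (j + 1) = [] := by
        apply List.drop_eq_nil_of_le; omega
      rw [hd]
      rfl
  rw [hinit, pv_main_fold u (u.length - 1) (le_refl _)]
  apply List.map_congr_left
  intro i hi
  rw [PySem.List.slice_from_natCast]
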